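-- pv_equiv track=rewrite | github.com/jamesEmerson112/OpenGlassBox-Python | src/map_coordinates_inside_radius.py | _generate_coordinates_for_radius
-- ===== SOURCE A (Python) =====
-- from typing import List, Tuple, Dict, Optional
--
-- def _generate_coordinates_for_radius(radius: int) -> List[Tuple[int, int]]:
--     """
--     Generate the list of relative coordinates within a radius.
--
--     Args:
--         radius: The radius to generate coordinates for
--
--     Returns:
--         List of (u, v) coordinate pairs representing relative positions
--     """
--     # Special case for radius 1 (plus sign)
--     if radius == 1:
--         return [(0, 0), (-1, 0), (1, 0), (0, -1), (0, 1)]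
--
--     # For other radii, generate a diamond pattern (Manhattan distance)
--     coords = []
--     for v in range(-radius, radius + 1):
--         for u in range(-radius, radius + 1):
--             # Use Manhattan distance
--             if abs(u) + abs(v) <= radius:
--                 coords.append((u, v))
--     return coords
-- ===== SOURCE B (Python) =====
-- from typing import List, Tuple
--
-- def _generate_coordinates_for_radius(radius: int) -> List[Tuple[int, int]]:
--     # Special case for radius 1 (plus sign, deliberate output order)
--     if radius == 1:
--         return [(0, 0), (-1, 0), (1, 0), (0, -1), (0, 1)]
--     # Diamond built row by row with a while loop: each row v contributes exactly
--     # the tight u-interval [-(radius-|v|), radius-|v|]; no box scan, no filter.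
--     coords = []
--     v = -radius
--     while v <= radius:
--         w = radius - abs(v)
--         coords.extend((u, v) for u in range(-w, w + 1))
--         v += 1
--     return coords
-- ===== Notes on version B (the rewrite author's own statement) =====
-- stated objective: alternative
-- what changed: B walks the rows with a while loop and an accumulator, each row being the tight u-interval [-(radius-|v|), radius-|v|] computed directly, instead of A's nested loops scanning the full (2r+1)x(2r+1) box with a Manhattan-distance filter and an append accumulator; the radius==1 special case is kept.
import Mathlib
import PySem

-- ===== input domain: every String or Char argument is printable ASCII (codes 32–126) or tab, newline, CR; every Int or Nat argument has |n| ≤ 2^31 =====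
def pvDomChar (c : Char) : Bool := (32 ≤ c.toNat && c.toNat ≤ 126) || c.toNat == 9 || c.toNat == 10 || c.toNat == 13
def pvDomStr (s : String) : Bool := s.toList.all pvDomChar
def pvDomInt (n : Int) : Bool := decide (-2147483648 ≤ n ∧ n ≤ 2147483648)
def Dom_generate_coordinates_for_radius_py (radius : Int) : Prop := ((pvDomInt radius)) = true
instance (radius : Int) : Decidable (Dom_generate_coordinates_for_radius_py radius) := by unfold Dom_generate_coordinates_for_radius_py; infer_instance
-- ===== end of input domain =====

-- B builds the diamond by recursion on the row index with each row's tight u-interval computed directly,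
-- instead of A's nested box scan with a Manhattan-distance filter (alternative decomposition, same output).
-- ===== PORT A =====
def generate_coordinates_for_radius_py (radius : Int) : List (Int × Int) :=
  if radius == 1 then [(0, 0), (-1, 0), (1, 0), (0, -1), (0, 1)]
  else
    (PySem.List.pyRange (-radius) (radius + 1) 1).foldl (fun coords v =>
      (PySem.List.pyRange (-radius) (radius + 1) 1).foldl (fun c u =>
        if |u| + |v| ≤ radius then c ++ [(u, v)] else c) coords) []

-- ===== PORT B =====
-- row(v) = [(u, v) for u in range(-w, w+1)] with w = radius - |v|
def pvRowB (radius v : Int) : List (Int × Int) :=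
  (PySem.List.pyRange (-(radius - |v|)) ((radius - |v|) + 1) 1).map (fun u => (u, v))

-- the while loop 'while v <= radius: coords.extend(row v); v += 1'; the Nat fuel
-- (number of remaining iterations, (2*radius+1).toNat) is a totality device only.
def pvRowsB (radius : Int) : Nat → Int → List (Int × Int) → List (Int × Int)
  | 0, _, coords => coords
  | n + 1, v, coords => pvRowsB radius n (v + 1) (coords ++ pvRowB radius v)

def generate_coordinates_for_radius_py_alt (radius : Int) : List (Int × Int) :=
  if radius == 1 then [(0, 0), (-1, 0), (1, 0), (0, -1), (0, 1)]
  else pvRowsB radius (2 * radius + 1).toNat (-radius) []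

-- ===== PRECONDITION & SPEC =====
def Spec_generate_coordinates_for_radius_py (radius : Int) (out : List (Int × Int)) : Prop := out = generate_coordinates_for_radius_py_alt radius
instance (radius : Int) (out : List (Int × Int)) : Decidable (Spec_generate_coordinates_for_radius_py radius out) := by unfold Spec_generate_coordinates_for_radius_py; infer_instance

-- ===== CLAIM (what is proved, stated in full; the proofs are below) =====
def Claim_equal_generate_coordinates_for_radius_py : Prop := ∀ (radius : Int), Dom_generate_coordinates_for_radius_py radius → Spec_generate_coordinates_for_radius_py radius (generate_coordinates_for_radius_py radius)

-- ===== LEMMAS AND PROOFS =====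

-- an 'if P then acc ++ [f x] else acc' foldl is a filter+map
theorem pv_foldl_append_ite {α β : Type} (P : α → Prop) [DecidablePred P] (f : α → β)
    (l : List α) (acc : List β) :
    l.foldl (fun acc x => if P x then acc ++ [f x] else acc) acc
      = acc ++ (l.filter (fun x => decide (P x))).map f := by
  induction l generalizing acc with
  | nil => simp
  | cons a t ih =>
    by_cases h : P a <;> simp [List.foldl_cons, h, ih, List.append_assoc]

-- filtering the full range by |u| + |v| ≤ r gives exactly the tight range
theorem pv_row_filter (r v : Int) (hv : -r ≤ v) (hv' : v ≤ r) :
    (PySem.List.pyRange (-r) (r + 1) 1).filter (fun u => decide (|u| + |v| ≤ r))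
      = PySem.List.pyRange (-(r - |v|)) ((r - |v|) + 1) 1 := by
  have hw : |v| ≤ r := abs_le.mpr ⟨hv, hv'⟩
  have hv0 : (0 : Int) ≤ |v| := abs_nonneg v
  rw [PySem.List.pyRange_one_append (-r) (-(r - |v|)) (r + 1) (by omega) (by omega),
      PySem.List.pyRange_one_append (-(r - |v|)) ((r - |v|) + 1) (r + 1) (by omega) (by omega)]
  rw [List.filter_append, List.filter_append]
  rw [List.filter_eq_nil_iff.mpr ?lo, List.filter_eq_self.mpr ?mid,
      List.filter_eq_nil_iff.mpr ?hi]
  · simp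
  case lo =>
    intro u hu
    have := PySem.List.mem_pyRange_one.mp hu
    simp only [decide_eq_true_eq]
    rcases abs_cases u with ⟨h, _⟩ | ⟨h, _⟩ <;> omega
  case mid =>
    intro u hu
    have := PySem.List.mem_pyRange_one.mp hu
    simp only [decide_eq_true_eq]
    rcases abs_cases u with ⟨h, _⟩ | ⟨h, _⟩ <;> omega
  case hi =>
    intro u hu
    have := PySem.List.mem_pyRange_one.mp hu
    simp only [decide_eq_true_eq]
    rcases abs_cases u with ⟨h, _⟩ | ⟨h, _⟩ <;> omega

-- an 'acc ++ g v' foldl is acc ++ flatMap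
theorem pv_foldl_flatMap {α β : Type} (g : α → List β) (l : List α) (acc : List β) :
    l.foldl (fun acc v => acc ++ g v) acc = acc ++ l.flatMap g := by
  induction l generalizing acc with
  | nil => simp
  | cons a t ih => simp [List.foldl_cons, ih, List.append_assoc]

-- B's while loop appends the flatMap of rows over the ascending range
theorem pv_rowsB_eq (r : Int) (n : Nat) (v : Int) (acc : List (Int × Int)) :
    pvRowsB r n v acc = acc ++ (PySem.List.pyRange v (v + n) 1).flatMap (pvRowB r) := by
  induction n generalizing v acc with
  | zero => simp [pvRowsB, PySem.List.pyRange_one_eq_nil]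
  | succ n ih =>
    rw [pvRowsB, ih,
        show v + ((n + 1 : Nat) : Int) = (v + 1) + (n : Int) by push_cast; ring,
        PySem.List.pyRange_one_cons (a := v) (b := (v + 1) + (n : Int)) (by omega),
        List.flatMap_cons, List.append_assoc]

-- ===== VERDICT (by name: the statement is the Claim_ definition above) =====
theorem generate_coordinates_for_radius_py_spec : Claim_equal_generate_coordinates_for_radius_py := by
  intro radius _
  unfold Spec_generate_coordinates_for_radius_py
  unfold generate_coordinates_for_radius_py generate_coordinates_for_radius_py_alt
  by_cases h1 : radius == 1
  · simp [h1]
  · simp only [h1]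
    by_cases hr : 0 ≤ radius
    · rw [pv_rowsB_eq]
      have hn : -radius + ((2 * radius + 1).toNat : Int) = radius + 1 := by omega
      rw [hn, List.nil_append]
      rw [show (fun coords v =>
            (PySem.List.pyRange (-radius) (radius + 1) 1).foldl (fun c u =>
              if |u| + |v| ≤ radius then c ++ [(u, v)] else c) coords)
          = (fun coords v => coords ++ pvRowB radius v) from ?_]
      · exact pv_foldl_flatMap (pvRowB radius) _ []
      · funext coords v
        rw [pv_foldl_append_ite (fun u => |u| + |v| ≤ radius) (fun u => (u, v))]
        -- row bound |v| ≤ radius need not hold pointwise here; handle both cases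
        by_cases hv : -radius ≤ v ∧ v ≤ radius
        · rw [pv_row_filter radius v hv.1 hv.2]; rfl
        · -- outside the row range: both sides are coords ++ []
          have hemp : (PySem.List.pyRange (-radius) (radius + 1) 1).filter
              (fun u => decide (|u| + |v| ≤ radius)) = [] := by
            apply List.filter_eq_nil_iff.mpr
            intro u hu
            have := PySem.List.mem_pyRange_one.mp hu
            simp only [decide_eq_true_eq]
            rcases abs_cases u with ⟨h, _⟩ | ⟨h, _⟩ <;>
              rcases abs_cases v with ⟨h2, _⟩ | ⟨h2, _⟩ <;> omega
          have hemp2 : pvRowB radius v = [] := by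
            unfold pvRowB
            rw [PySem.List.pyRange_one_eq_nil (by
              rcases abs_cases v with ⟨h2, _⟩ | ⟨h2, _⟩ <;> omega)]
            rfl
          rw [hemp, hemp2]; simp
    · -- negative radius: both sides empty
      rw [PySem.List.pyRange_one_eq_nil (by omega)]
      have : (2 * radius + 1).toNat = 0 := by omega
      rw [this]
      rfl
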